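-- pv_equiv track=rewrite | github.com/havijw/aoc23 | 1/puzzle2.py | parse_calibration
-- ===== SOURCE A (Python) =====
-- word_to_num = {
--     "one": 1,
--     "two": 2,
--     "three": 3,
--     "four": 4,
--     "five": 5,
--     "six": 6,
--     "seven": 7,
--     "eight": 8,
--     "nine": 9,
-- }
--
-- digits = list(map(str, range(1, 10)))
--
-- def parse_calibration(line: str) -> int:
--     line_digits = []
--     for i in range(len(line)):
--         if line[i] in digits:
--             line_digits.append(int(line[i]))
--         else:
--             for s in word_to_num:
--                 if line[i:].startswith(s):
--                     line_digits.append(word_to_num[s])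
--                     break
--
--     res = 10 * line_digits[0] + line_digits[-1]
--     return res
-- ===== SOURCE B (Python) =====
-- word_to_num = {
--     "one": 1,
--     "two": 2,
--     "three": 3,
--     "four": 4,
--     "five": 5,
--     "six": 6,
--     "seven": 7,
--     "eight": 8,
--     "nine": 9,
-- }
--
--
-- def parse_calibration(line: str) -> int:
--     # Two directed early-exit scans instead of collecting every match:
--     # forward scan for the first digit/word-digit, backward scan for the last.
--     def value_at(i):
--         c = line[i]
--         if c in "123456789":
--             return ord(c) - 48
--         for w, v in word_to_num.items():
--             if line.startswith(w, i):
--                 return v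
--         return None
--
--     n = len(line)
--     first = next(v for i in range(n) if (v := value_at(i)) is not None)
--     last = next(v for i in range(n - 1, -1, -1) if (v := value_at(i)) is not None)
--     return 10 * first + last
-- ===== Notes on version B (the rewrite author's own statement) =====
-- stated objective: simpler
-- what changed: B replaces A's full pass that appends every digit/word match to a list with two early-exit directed scans (forward for the first value, backward for the last), never materialising the match list.
import Mathlib
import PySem

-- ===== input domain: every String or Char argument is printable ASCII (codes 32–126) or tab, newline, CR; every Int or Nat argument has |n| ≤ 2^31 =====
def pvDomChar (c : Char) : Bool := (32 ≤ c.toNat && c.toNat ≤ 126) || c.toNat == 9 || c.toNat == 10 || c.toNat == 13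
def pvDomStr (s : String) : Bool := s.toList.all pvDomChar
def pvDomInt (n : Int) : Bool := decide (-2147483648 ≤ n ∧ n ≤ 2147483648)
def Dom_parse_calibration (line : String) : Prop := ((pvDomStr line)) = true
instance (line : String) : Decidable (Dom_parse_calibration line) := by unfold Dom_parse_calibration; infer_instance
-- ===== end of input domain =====

-- B replaces A's list-building full pass by two early-exit directed scans (objective: simpler).
-- Shared constants (module-level data of both Pythons):
def pcWords : List (String × Int) :=
  [("one", 1), ("two", 2), ("three", 3), ("four", 4), ("five", 5),
   ("six", 6), ("seven", 7), ("eight", 8), ("nine", 9)]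

def pcDigits : List Char := ['1', '2', '3', '4', '5', '6', '7', '8', '9']

-- ===== PORT A =====
-- loop body of A: examine line[i] / line[i:] and append at most one value to acc.
-- line[i:] is cs.drop i (i ≥ 0); startswith is List.isPrefixOf (exact on code points);
-- int(line[i]) for a digit char is its code minus 48.
def pcStep (cs : List Char) (acc : List Int) (i : Nat) : List Int :=
  match cs.drop i with
  | [] => acc
  | c :: _ =>
    if pcDigits.contains c then acc ++ [((c.toNat : Int) - 48)]
    else
      match pcWords.findSome? (fun p =>
        if p.1.toList.isPrefixOf (cs.drop i) then some p.2 else none) with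
      | some v => acc ++ [v]
      | none => acc

def parse_calibration (line : String) : Int :=
  -- line_digits[0] / line_digits[-1]; the .getD 0 is reached only where Python A raises IndexError
  10 * (PySem.List.pyGet? ((List.range line.toList.length).foldl (pcStep line.toList) []) 0).getD 0 +
    (PySem.List.pyGet? ((List.range line.toList.length).foldl (pcStep line.toList) []) (-1)).getD 0

-- ===== PORT B =====
-- value_at(i) of Source B: digit char or first matching word at position i, else none.
def pcValueAt (cs : List Char) (i : Nat) : Option Int :=
  match cs.drop i with
  | [] => none
  | c :: _ =>
    if pcDigits.contains c then some ((c.toNat : Int) - 48)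
    else pcWords.findSome? (fun p =>
      if p.1.toList.isPrefixOf (cs.drop i) then some p.2 else none)

def parse_calibration_alt (line : String) : Int :=
  -- next(… for i in range(n)) / next(… for i in range(n-1,-1,-1)): first hit of each directed scan
  match (List.range line.toList.length).findSome? (pcValueAt line.toList),
        (List.range line.toList.length).reverse.findSome? (pcValueAt line.toList) with
  | some first, some last => 10 * first + last
  | _, _ => 0   -- reached only where Python B raises StopIteration (outside Pre_)

-- ===== PRECONDITION & SPEC =====
-- Pre_ excludes exactly the lines with no digit char and no spelled-out digit word:
-- there Python A raises IndexError (and B StopIteration).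
def Pre_parse_calibration (line : String) : Prop :=
  (line.toList.any (fun c => pcDigits.contains c)) = true
    ∨ ∃ p ∈ pcWords, p.1.toList <:+: line.toList

instance (line : String) : Decidable (Pre_parse_calibration line) := by
  unfold Pre_parse_calibration; infer_instance

def pvWitness_parse_calibration : String := "xtwone3four"

def Spec_parse_calibration (line : String) (out : Int) : Prop := out = parse_calibration_alt line
instance (line : String) (out : Int) : Decidable (Spec_parse_calibration line out) := by
  unfold Spec_parse_calibration; infer_instance

-- ===== CLAIM (what is proved, stated in full; the proofs are below) =====
def Claim_equal_parse_calibration : Prop :=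
  ∀ (line : String), Dom_parse_calibration line → Pre_parse_calibration line →
    Spec_parse_calibration line (parse_calibration line)

-- ===== LEMMAS AND PROOFS =====

-- A's loop body appends exactly the optional value B's value_at computes.
theorem pcStep_eq (cs : List Char) (acc : List Int) (i : Nat) :
    pcStep cs acc i = acc ++ (pcValueAt cs i).toList := by
  unfold pcStep pcValueAt
  cases h : cs.drop i with
  | nil => simp
  | cons c t =>
    dsimp only
    by_cases hd : pcDigits.contains c = true
    · rw [if_pos hd, if_pos hd]; simp
    · rw [if_neg hd, if_neg hd]
      cases hf : pcWords.findSome? (fun p =>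
          if p.1.toList.isPrefixOf (c :: t) then some p.2 else none) <;> simp

-- A's accumulated list is the filterMap of B's value_at over the index range.
theorem foldl_pcStep (cs : List Char) (l : List Nat) (acc : List Int) :
    l.foldl (pcStep cs) acc = acc ++ l.filterMap (pcValueAt cs) := by
  induction l generalizing acc with
  | nil => simp
  | cons i l ih =>
    rw [List.foldl_cons, ih, pcStep_eq, List.filterMap_cons]
    cases pcValueAt cs i <;> simp

theorem findSome?_eq_head?_filterMap {α β : Type} (f : α → Option β) (l : List α) :
    l.findSome? f = (l.filterMap f).head? := by
  induction l with
  | nil => simp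
  | cons a l ih =>
    cases h : f a
    · simp only [List.findSome?_cons, List.filterMap_cons, h]; exact ih
    · simp only [List.findSome?_cons, List.filterMap_cons, h, List.head?_cons]

theorem pcValueAt_isSome_of_drop (cs : List Char) (i : Nat) (c : Char) (t : List Char)
    (h : cs.drop i = c :: t) (hc : pcDigits.contains c = true) :
    pcValueAt cs i ≠ none := by
  unfold pcValueAt
  rw [h]
  dsimp only
  rw [if_pos hc]
  simp

-- Under Pre_, some position yields a value.
theorem exists_value (line : String) (h : Pre_parse_calibration line) :
    ∃ i ∈ List.range line.toList.length, pcValueAt line.toList i ≠ none := by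
  unfold Pre_parse_calibration at h
  rcases h with h | h
  · rw [List.any_eq_true] at h
    obtain ⟨c, hc, hd⟩ := h
    obtain ⟨i, hi, hget⟩ := List.mem_iff_getElem.mp hc
    have hdrop : line.toList.drop i = c :: line.toList.drop (i + 1) := by
      rw [List.drop_eq_getElem_cons hi, hget]
    exact ⟨i, List.mem_range.mpr hi, pcValueAt_isSome_of_drop _ i c _ hdrop hd⟩
  · obtain ⟨p, hp, s, t, hst⟩ := h
    have hw : p.1.toList ≠ [] := by
      simp only [pcWords, List.mem_cons, List.not_mem_nil, or_false] at hp
      rcases hp with rfl|rfl|rfl|rfl|rfl|rfl|rfl|rfl|rfl <;> decide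
    have hdrop : line.toList.drop s.length = p.1.toList ++ t := by
      rw [← hst, List.append_assoc, List.drop_left]
    have hlen : s.length < line.toList.length := by
      have hpos : 0 < p.1.toList.length := List.length_pos_of_ne_nil hw
      rw [← hst]
      simp only [List.length_append]
      omega
    refine ⟨s.length, List.mem_range.mpr hlen, ?_⟩
    rcases hq : p.1.toList with _ | ⟨a, w⟩
    · exact absurd hq hw
    · rw [hq] at hdrop
      unfold pcValueAt
      rw [hdrop, List.cons_append]
      dsimp only
      by_cases hd : pcDigits.contains a = true
      · rw [if_pos hd]; simp
      · rw [if_neg hd]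
        intro hnone
        rw [List.findSome?_eq_none_iff] at hnone
        have h2 := hnone p hp
        rw [if_pos ?pre] at h2
        · exact Option.some_ne_none _ h2
        case pre =>
          rw [List.isPrefixOf_iff_prefix, hq, ← List.cons_append]
          exact List.prefix_append _ _

theorem parse_calibration_spec' (line : String) (h : Pre_parse_calibration line) :
    parse_calibration line = parse_calibration_alt line := by
  unfold parse_calibration parse_calibration_alt
  rw [foldl_pcStep, List.nil_append,
    findSome?_eq_head?_filterMap, findSome?_eq_head?_filterMap,
    List.filterMap_reverse, List.head?_reverse]
  set L := (List.range line.toList.length).filterMap (pcValueAt line.toList) with hL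
  have hne : L ≠ [] := by
    obtain ⟨i, hi, hv⟩ := exists_value line h
    intro hnil
    rw [hL, List.filterMap_eq_nil_iff] at hnil
    exact hv (hnil i hi)
  obtain ⟨a, ha⟩ := Option.ne_none_iff_exists'.mp
    (fun hh => hne (List.head?_eq_none_iff.mp hh))
  obtain ⟨b, hb⟩ := Option.ne_none_iff_exists'.mp
    (fun hh => hne (List.getLast?_eq_none_iff.mp hh))
  have h0 : PySem.List.pyGet? L 0 = some a := by
    rw [PySem.List.pyGet?_zero, ← List.head?_eq_getElem?, ha]
  have hm1 : PySem.List.pyGet? L (-1) = some b := by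
    rw [PySem.List.pyGet?_neg_one, hb]
  rw [h0, hm1, ha, hb]
  rfl

-- ===== VERDICT (by name: the statement is the Claim_ definition above) =====
theorem parse_calibration_spec : Claim_equal_parse_calibration := by
  intro line _ hpre
  exact parse_calibration_spec' line hpre
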